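-- pv_equiv track=rewrite | github.com/NimaJafariComp/CareerLift | fastapi/app/services/ats_service.py | expand_skill_hierarchy
-- ===== SOURCE A (Python) =====
-- from typing import Any, Dict, Iterable, List, Optional
--
-- SKILL_IMPLICATIONS: dict[str, list[str]] = {
--     "deep learning": ["machine learning"],
--     "reinforcement learning": ["machine learning"],
--     "pytorch": ["deep learning", "machine learning"],
--     "tensorflow": ["deep learning", "machine learning"],
--     "keras": ["deep learning", "machine learning"],
--     "stable-baselines3": ["reinforcement learning", "machine learning"],
-- }
--
-- def expand_skill_hierarchy(skills: Iterable[str]) -> set[str]: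
--     expanded = set(skills)
--     changed = True
--     while changed:
--         changed = False
--         for skill in list(expanded):
--             implied = SKILL_IMPLICATIONS.get(skill, [])
--             for parent in implied:
--                 if parent not in expanded:
--                     expanded.add(parent)
--                     changed = True
--     return expanded
-- ===== SOURCE B (Python) =====
-- from typing import Any, Dict, Iterable, List, Optional
--
-- SKILL_IMPLICATIONS: dict[str, list[str]] = {
--     "deep learning": ["machine learning"],
--     "reinforcement learning": ["machine learning"],
--     "pytorch": ["deep learning", "machine learning"],
--     "tensorflow": ["deep learning", "machine learning"],
--     "keras": ["deep learning", "machine learning"],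
--     "stable-baselines3": ["reinforcement learning", "machine learning"],
-- }
--
-- def expand_skill_hierarchy(skills: Iterable[str]) -> set[str]:
--     # Worklist closure: only skills that are dict keys go on the queue; each queue entry is
--     # processed exactly once (no fixpoint rescans of the whole set).
--     expanded = set(skills)
--     queue = [s for s in skills if s in SKILL_IMPLICATIONS]
--     i = 0
--     while i < len(queue):
--         for parent in SKILL_IMPLICATIONS[queue[i]]:
--             if parent not in expanded:
--                 expanded.add(parent)
--                 if parent in SKILL_IMPLICATIONS:
--                     queue.append(parent)
--         i += 1
--     return expanded
-- ===== Notes on version B (the rewrite author's own statement) =====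
-- stated objective: alternative
-- what changed: Replaced the 'repeat full passes over the whole set until nothing changes' fixpoint loop by a single worklist sweep whose queue holds only skills that are dict keys, each processed exactly once; this works because the implication lists are transitively closed.
import Mathlib
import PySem

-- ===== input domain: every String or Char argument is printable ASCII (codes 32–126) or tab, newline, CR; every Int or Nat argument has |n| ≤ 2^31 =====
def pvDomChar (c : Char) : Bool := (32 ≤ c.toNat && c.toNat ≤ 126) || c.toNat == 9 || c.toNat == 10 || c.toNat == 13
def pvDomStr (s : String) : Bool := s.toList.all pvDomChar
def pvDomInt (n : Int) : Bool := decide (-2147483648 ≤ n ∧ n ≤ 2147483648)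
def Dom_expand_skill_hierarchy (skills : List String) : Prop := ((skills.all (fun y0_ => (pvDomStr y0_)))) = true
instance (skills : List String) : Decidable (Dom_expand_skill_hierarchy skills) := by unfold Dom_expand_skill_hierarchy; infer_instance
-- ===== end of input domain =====

-- B replaces A's repeated full fixpoint passes by one worklist sweep (each skill processed once); the
-- equivalence proved is about the RETURN value, compared as a set of skills.

-- B replaces A's repeated full fixpoint passes over the whole set by a single worklist sweep in which
-- each skill (including newly implied ones appended to the list) is processed exactly once.
-- The return value is a Python set; it is compared as a set of skills.

-- ===== PORT A =====
-- module-level constant SKILL_IMPLICATIONS (shared context of both versions)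
def SKILL_IMPLICATIONS : PySem.Dict String (List String) := PySem.Dict.ofList
  [ ("deep learning", ["machine learning"]),
    ("reinforcement learning", ["machine learning"]),
    ("pytorch", ["deep learning", "machine learning"]),
    ("tensorflow", ["deep learning", "machine learning"]),
    ("keras", ["deep learning", "machine learning"]),
    ("stable-baselines3", ["reinforcement learning", "machine learning"]) ]

-- one iteration of A's 'while changed' body: 'for skill in list(expanded): for parent in …: if …',
-- carrying the pair (expanded, changed)
def pvPassA (snapshot : List String) (st : PySem.Set String × Bool) : PySem.Set String × Bool :=
  snapshot.foldl (fun st skill =>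
    (PySem.Dict.getD SKILL_IMPLICATIONS skill []).foldl (fun st parent =>
      if PySem.Set.contains st.1 parent then st else (PySem.Set.add st.1 parent, true)) st) st

-- A's 'while changed' loop; the fuel only makes the loop total: each changing pass adds at least one of
-- the 3 strings occurring in SKILL_IMPLICATIONS' values, so 5 rounds are never exhausted (the proof
-- below shows the loop in fact stops after at most 2 passes).
def pvLoopA (fuel : Nat) (expanded : PySem.Set String) : PySem.Set String :=
  match fuel with
  | 0 => expanded
  | fuel + 1 =>
      let st := pvPassA expanded (expanded, false)
      if st.2 then pvLoopA fuel st.1 else st.1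

def expand_skill_hierarchy (skills : List String) : List String :=
  pvLoopA 5 (PySem.Set.ofList skills)


-- ===== PORT B =====
-- B's worklist: the queue holds only skills that are dict keys; each queue entry is processed once by
-- an advancing index i ('while i < len(queue)'); the fuel only makes the loop total: the queue grows by
-- at most 3 entries beyond its initial length, so 'queue.length + 4' rounds always reach the end.
-- State st = (expanded, queue).
def pvLoopB (fuel : Nat) (st : PySem.Set String × List String) (i : Nat) : PySem.Set String :=
  match fuel with
  | 0 => st.1
  | fuel + 1 =>
      if h : i < st.2.length then
        pvLoopB fuel
          -- 'SKILL_IMPLICATIONS[queue[i]]': the queue only ever holds dict keys (each entry passed the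
          -- 'in SKILL_IMPLICATIONS' test before being enqueued), so the Python subscript never raises
          -- and 'getD … []' is exact here
          ((PySem.Dict.getD SKILL_IMPLICATIONS st.2[i] []).foldl
            (fun st parent =>
              if PySem.Set.contains st.1 parent then st
              else (PySem.Set.add st.1 parent,
                    if PySem.Dict.contains SKILL_IMPLICATIONS parent then st.2 ++ [parent] else st.2))
            st)
          (i + 1)
      else st.1

def expand_skill_hierarchy_alt (skills : List String) : List String :=
  let expanded := PySem.Set.ofList skills
  let queue := skills.filter (fun s => PySem.Dict.contains SKILL_IMPLICATIONS s)
  pvLoopB (queue.length + 4) (expanded, queue) 0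

-- ===== PRECONDITION & SPEC =====
def Spec_expand_skill_hierarchy (skills : List String) (out : List String) : Prop := out = expand_skill_hierarchy_alt skills
instance (skills : List String) (out : List String) : Decidable (Spec_expand_skill_hierarchy skills out) := by unfold Spec_expand_skill_hierarchy; infer_instance

-- ===== CLAIM (what is proved, stated in full; the proofs are below) =====
def Claim_equal_expand_skill_hierarchy : Prop := ∀ (skills : List String), Dom_expand_skill_hierarchy skills → Spec_expand_skill_hierarchy skills (expand_skill_hierarchy skills)

-- ===== LEMMAS AND PROOFS =====
-- Both ports are shown equal to the one-pass fold 'S1 = s0.foldl pvStep s0' over the deduplicated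
-- input s0; the key fact is that SKILL_IMPLICATIONS' value lists are transitively closed (pvCV), so S1
-- is closed under implication and neither loop adds anything after it.

def pvGetI (s : String) : List String := PySem.Dict.getD SKILL_IMPLICATIONS s []
lemma pvItems_eq : SKILL_IMPLICATIONS.items =
  [ ("deep learning", ["machine learning"]),
    ("reinforcement learning", ["machine learning"]),
    ("pytorch", ["deep learning", "machine learning"]),
    ("tensorflow", ["deep learning", "machine learning"]),
    ("keras", ["deep learning", "machine learning"]),
    ("stable-baselines3", ["reinforcement learning", "machine learning"]) ] := by decide
lemma pvGetI_eq (s : String) : pvGetI s =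
    if s = "deep learning" then ["machine learning"]
    else if s = "reinforcement learning" then ["machine learning"]
    else if s = "pytorch" then ["deep learning", "machine learning"]
    else if s = "tensorflow" then ["deep learning", "machine learning"]
    else if s = "keras" then ["deep learning", "machine learning"]
    else if s = "stable-baselines3" then ["reinforcement learning", "machine learning"]
    else [] := by
  by_cases h1 : s = "deep learning"
  · subst h1; decide
  by_cases h2 : s = "reinforcement learning"
  · subst h2; decide
  by_cases h3 : s = "pytorch"
  · subst h3; decide
  by_cases h4 : s = "tensorflow"
  · subst h4; decide
  by_cases h5 : s = "keras"
  · subst h5; decide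
  by_cases h6 : s = "stable-baselines3"
  · subst h6; decide
  simp only [pvGetI, PySem.Dict.getD, PySem.Dict.get?, pvItems_eq]
  simp [List.find?_cons, beq_iff_eq, Ne.symm h1, Ne.symm h2, Ne.symm h3, Ne.symm h4, Ne.symm h5, Ne.symm h6, h1, h2, h3, h4, h5, h6]
lemma pvCV {s p q : String} (hp : p ∈ pvGetI s) (hq : q ∈ pvGetI p) : q ∈ pvGetI s := by
  rw [pvGetI_eq] at hp ⊢
  split_ifs at hp ⊢ with h1 h2 h3 h4 h5 h6 <;>
    simp only [List.mem_cons, List.mem_singleton, List.not_mem_nil] at hp ⊢ <;>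
    rcases hp with rfl | hp <;> simp_all [pvGetI_eq]

lemma pvParents {s p : String} (hp : p ∈ pvGetI s) :
    p ∈ ["machine learning", "deep learning", "reinforcement learning"] := by
  rw [pvGetI_eq] at hp
  split_ifs at hp <;> simp_all <;> rcases hp with rfl | rfl <;> simp
def pvAddAll (cur ps : List String) : List String :=
  ps.foldl (fun o p => if p ∈ o then o else o ++ [p]) cur
def pvStep (cur : List String) (x : String) : List String := pvAddAll cur (pvGetI x)

lemma pvMem_addAll {cur ps : List String} {x : String} :
    x ∈ pvAddAll cur ps ↔ x ∈ cur ∨ x ∈ ps := by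
  induction ps generalizing cur with
  | nil => simp [pvAddAll]
  | cons p ps ih =>
    rw [show pvAddAll cur (p :: ps) = pvAddAll (if p ∈ cur then cur else cur ++ [p]) ps from rfl, ih]
    by_cases hp : p ∈ cur <;> simp [hp] <;> aesop

lemma pvAddAll_exists (ps cur : List String) :
    ∃ new, pvAddAll cur ps = cur ++ new ∧ (∀ p ∈ new, p ∈ ps ∧ p ∉ cur) ∧ new.Nodup := by
  induction ps generalizing cur with
  | nil => exact ⟨[], by simp [pvAddAll]⟩
  | cons p ps ih =>
    by_cases hp : p ∈ cur
    · obtain ⟨new, h1, h2, h3⟩ := ih cur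
      refine ⟨new, ?_, fun q hq => ⟨List.mem_cons_of_mem _ (h2 q hq).1, (h2 q hq).2⟩, h3⟩
      rw [show pvAddAll cur (p :: ps) = pvAddAll (if p ∈ cur then cur else cur ++ [p]) ps from rfl,
        if_pos hp, h1]
    · obtain ⟨new, h1, h2, h3⟩ := ih (cur ++ [p])
      refine ⟨p :: new, ?_, ?_, ?_⟩
      · rw [show pvAddAll cur (p :: ps) = pvAddAll (if p ∈ cur then cur else cur ++ [p]) ps from rfl,
          if_neg hp, h1]
        simp
      · intro q hq'
        rcases List.mem_cons.1 hq' with rfl | hq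
        · exact ⟨List.mem_cons_self .., hp⟩
        · obtain ⟨hq1, hq2⟩ := h2 q hq
          exact ⟨List.mem_cons_of_mem _ hq1, fun hc => hq2 (by simp [hc])⟩
      · refine List.nodup_cons.2 ⟨fun hc => ?_, h3⟩
        exact (h2 p hc).2 (by simp)

lemma pvAddAll_id {cur ps : List String} (h : ∀ p ∈ ps, p ∈ cur) : pvAddAll cur ps = cur := by
  induction ps with
  | nil => rfl
  | cons p ps ih =>
    rw [show pvAddAll cur (p :: ps) = pvAddAll (if p ∈ cur then cur else cur ++ [p]) ps from rfl,
      if_pos (h p (by simp))]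
    exact ih fun q hq => h q (by simp [hq])
lemma pvFold_closed : ∀ (l cur : List String),
    (∀ p ∈ cur, p ∈ l ∨ (∀ q ∈ pvGetI p, q ∈ cur)) →
    ∀ p ∈ l.foldl pvStep cur, ∀ q ∈ pvGetI p, q ∈ l.foldl pvStep cur := by
  intro l
  induction l with
  | nil =>
    intro cur h p hp q hq
    simp only [List.foldl_nil] at *
    rcases h p hp with h' | h'
    · simp at h'
    · exact h' q hq
  | cons x xs ih =>
    intro cur h
    simp only [List.foldl_cons]
    refine ih (pvStep cur x) ?_
    intro p hp
    rcases pvMem_addAll.1 hp with hpc | hpg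
    · rcases h p hpc with hx | hcl
      · rcases List.mem_cons.1 hx with rfl | hxs
        · exact Or.inr fun q hq => pvMem_addAll.2 (Or.inr hq)
        · exact Or.inl hxs
      · exact Or.inr fun q hq => pvMem_addAll.2 (Or.inl (hcl q hq))
    · exact Or.inr fun q hq => pvMem_addAll.2 (Or.inr (pvCV hpg hq))

lemma pvFold_exists : ∀ (l cur : List String), ∃ new, l.foldl pvStep cur = cur ++ new ∧
    (∀ p ∈ new, p ∈ ["machine learning", "deep learning", "reinforcement learning"] ∧ p ∉ cur) ∧
    new.Nodup := by
  intro l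
  induction l with
  | nil => exact fun cur => ⟨[], by simp⟩
  | cons x xs ih =>
    intro cur
    obtain ⟨n1, e1, m1, d1⟩ := pvAddAll_exists (pvGetI x) cur
    obtain ⟨n2, e2, m2, d2⟩ := ih (pvStep cur x)
    refine ⟨n1 ++ n2, ?_, ?_, ?_⟩
    · have e1' : pvStep cur x = cur ++ n1 := e1
      rw [e1'] at e2
      rw [List.foldl_cons, e1', e2, List.append_assoc]
    · intro p hp
      rcases List.mem_append.1 hp with h | h
      · exact ⟨pvParents (m1 p h).1, (m1 p h).2⟩
      · refine ⟨(m2 p h).1, fun hc => (m2 p h).2 ?_⟩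
        rw [pvStep, e1]
        exact List.mem_append.2 (Or.inl hc)
    · refine List.Nodup.append d1 d2 ?_
      intro a ha1 ha2
      exact (m2 a ha2).2 (by rw [pvStep, e1]; exact List.mem_append.2 (Or.inr ha1))


lemma pvInnerA_step (st : PySem.Set String × Bool) (p : String) :
    (if PySem.Set.contains st.1 p then st else (PySem.Set.add st.1 p, true))
      = (if p ∈ st.1 then st.1 else st.1 ++ [p], if p ∈ st.1 then st.2 else true) := by
  by_cases hp : p ∈ st.1
  · simp [hp, (PySem.Set.contains_iff _ _).2 hp]
  · have : ¬ PySem.Set.contains st.1 p = true := fun hc => hp ((PySem.Set.contains_iff _ _).1 hc)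
    simp [hp, this, PySem.Set.add_of_not_mem hp]

lemma pvInnerA_fst (ps : List String) : ∀ (st : PySem.Set String × Bool),
    (ps.foldl (fun st parent =>
      if PySem.Set.contains st.1 parent then st else (PySem.Set.add st.1 parent, true)) st).1
      = pvAddAll st.1 ps := by
  induction ps with
  | nil => intro st; rfl
  | cons p ps ih =>
    intro st
    rw [List.foldl_cons, pvInnerA_step,
      show pvAddAll st.1 (p :: ps) = pvAddAll (if p ∈ st.1 then st.1 else st.1 ++ [p]) ps from rfl]
    exact ih _

lemma pvInnerA_id (ps : List String) (st : PySem.Set String × Bool)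
    (h : ∀ p ∈ ps, p ∈ st.1) :
    (ps.foldl (fun st parent =>
      if PySem.Set.contains st.1 parent then st else (PySem.Set.add st.1 parent, true)) st) = st := by
  induction ps with
  | nil => rfl
  | cons p ps ih =>
    rw [List.foldl_cons, pvInnerA_step, if_pos (h p (by simp)), if_pos (h p (by simp))]
    exact ih fun q hq => h q (by simp [hq])

lemma pvPassA_fst (snap : List String) : ∀ (st : PySem.Set String × Bool),
    (pvPassA snap st).1 = snap.foldl pvStep st.1 := by
  induction snap with
  | nil => intro st; rfl
  | cons x xs ih =>
    intro st
    rw [pvPassA, List.foldl_cons]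
    have h := ih (((pvGetI x).foldl (fun st parent =>
      if PySem.Set.contains st.1 parent then st else (PySem.Set.add st.1 parent, true)) st))
    rw [pvPassA] at h
    rw [show (PySem.Dict.getD SKILL_IMPLICATIONS x []) = pvGetI x from rfl, h,
      pvInnerA_fst, List.foldl_cons, pvStep]

lemma pvPassA_of_closed (snap : List String) : ∀ (st : PySem.Set String × Bool),
    (∀ x ∈ snap, ∀ p ∈ pvGetI x, p ∈ st.1) → pvPassA snap st = st := by
  induction snap with
  | nil => intro st _; rfl
  | cons x xs ih =>
    intro st h
    rw [pvPassA, List.foldl_cons,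
      show (PySem.Dict.getD SKILL_IMPLICATIONS x []) = pvGetI x from rfl,
      pvInnerA_id _ _ (h x (by simp))]
    exact ih st fun y hy => h y (by simp [hy])
lemma pvS1_closed (s0 : List String) :
    ∀ p ∈ s0.foldl pvStep s0, ∀ q ∈ pvGetI p, q ∈ s0.foldl pvStep s0 :=
  pvFold_closed s0 s0 (fun p hp => Or.inl hp)

lemma pvLoopA_succ (fuel : Nat) (e : PySem.Set String) :
    pvLoopA (fuel + 1) e
      = if (pvPassA e (e, false)).2 then pvLoopA fuel (pvPassA e (e, false)).1
        else (pvPassA e (e, false)).1 := rfl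

lemma pvA_eq (skills : List String) :
    expand_skill_hierarchy skills
      = (PySem.Set.ofList skills).foldl pvStep (PySem.Set.ofList skills) := by
  rw [expand_skill_hierarchy]
  generalize PySem.Set.ofList skills = s0
  have hfst : (pvPassA s0 (s0, false)).1 = s0.foldl pvStep s0 := pvPassA_fst s0 (s0, false)
  rw [pvLoopA_succ, hfst]
  cases hc : (pvPassA s0 (s0, false)).2 with
  | false => rw [if_neg (by simp)]
  | true =>
    rw [if_pos rfl, pvLoopA_succ]
    have hclosed : pvPassA (s0.foldl pvStep s0) (s0.foldl pvStep s0, false)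
        = (s0.foldl pvStep s0, false) :=
      pvPassA_of_closed _ _ (fun x hx p hp => pvS1_closed s0 x hx p hp)
    rw [hclosed]
    simp

-- inner body of B's for-loop over one implication list, on the state (expanded, queue)
def pvFB (st : PySem.Set String × List String) (parent : String) :
    PySem.Set String × List String :=
  if PySem.Set.contains st.1 parent then st
  else (PySem.Set.add st.1 parent,
        if PySem.Dict.contains SKILL_IMPLICATIONS parent then st.2 ++ [parent] else st.2)

-- processing one queue entry
def pvStepPair (st : PySem.Set String × List String) (x : String) :
    PySem.Set String × List String :=
  (pvGetI x).foldl pvFB st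

lemma pvLoopB_eq (fuel : Nat) (st : PySem.Set String × List String) (i : Nat) :
    pvLoopB (fuel + 1) st i
      = if h : i < st.2.length then pvLoopB fuel (pvStepPair st st.2[i]) (i + 1) else st.1 := rfl

lemma pvGetI_nil_of_not_key {s : String}
    (h : PySem.Dict.contains SKILL_IMPLICATIONS s = false) : pvGetI s = [] :=
  PySem.Dict.getD_of_not_contains _ _ h

lemma pvInnerB_spec (ps : List String) : ∀ (st : PySem.Set String × List String),
    ∃ app, ps.foldl pvFB st = (pvAddAll st.1 ps, st.2 ++ app) ∧
      (∀ q ∈ app, q ∈ ps ∧ q ∉ st.1) ∧ app.Nodup := by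
  induction ps with
  | nil => exact fun st => ⟨[], by simp [pvAddAll], by simp, List.nodup_nil⟩
  | cons p ps ih =>
    intro st
    by_cases hp : p ∈ st.1
    · obtain ⟨app, h1, h2, h3⟩ := ih st
      refine ⟨app, ?_, fun q hq => ⟨List.mem_cons_of_mem _ (h2 q hq).1, (h2 q hq).2⟩, h3⟩
      rw [List.foldl_cons, show pvFB st p = st from by
            rw [pvFB, if_pos ((PySem.Set.contains_iff _ _).2 hp)], h1,
        show pvAddAll st.1 (p :: ps) = pvAddAll (if p ∈ st.1 then st.1 else st.1 ++ [p]) ps from rfl,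
        if_pos hp]
    · have hc : ¬ PySem.Set.contains st.1 p = true :=
        fun hc => hp ((PySem.Set.contains_iff _ _).1 hc)
      set Q' : List String :=
        (if PySem.Dict.contains SKILL_IMPLICATIONS p then st.2 ++ [p] else st.2) with hQ'
      have hstep : pvFB st p = (st.1 ++ [p], Q') := by
        rw [pvFB, if_neg hc, PySem.Set.add_of_not_mem hp]
      obtain ⟨app, h1, h2, h3⟩ := ih (st.1 ++ [p], Q')
      have hfst : pvAddAll st.1 (p :: ps) = pvAddAll (st.1 ++ [p]) ps := by
        rw [show pvAddAll st.1 (p :: ps)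
              = pvAddAll (if p ∈ st.1 then st.1 else st.1 ++ [p]) ps from rfl, if_neg hp]
      by_cases hk : PySem.Dict.contains SKILL_IMPLICATIONS p = true
      · refine ⟨p :: app, ?_, ?_, ?_⟩
        · rw [List.foldl_cons, hstep, h1, hfst, hQ', if_pos hk, List.append_assoc]
          rfl
        · intro q hq'
          rcases List.mem_cons.1 hq' with rfl | hq
          · exact ⟨List.mem_cons_self .., hp⟩
          · exact ⟨List.mem_cons_of_mem _ (h2 q hq).1,
              fun hcc => (h2 q hq).2 (List.mem_append.2 (Or.inl hcc))⟩
        · exact List.nodup_cons.2 ⟨fun hcc => (h2 p hcc).2 (by simp), h3⟩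
      · refine ⟨app, ?_, ?_, h3⟩
        · rw [List.foldl_cons, hstep, h1, hfst, hQ', if_neg hk]
        · intro q hq
          exact ⟨List.mem_cons_of_mem _ (h2 q hq).1,
            fun hcc => (h2 q hq).2 (List.mem_append.2 (Or.inl hcc))⟩

lemma pvFoldStep_sub (l cur : List String) : ∀ q ∈ cur, q ∈ l.foldl pvStep cur := by
  obtain ⟨new, e, -, -⟩ := pvFold_exists l cur
  intro q hq
  rw [e]
  exact List.mem_append.2 (Or.inl hq)

lemma pvPairFold (l : List String) : ∀ (st : PySem.Set String × List String),
    ∃ app, l.foldl pvStepPair st = (l.foldl pvStep st.1, st.2 ++ app) ∧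
      (∀ q ∈ app, q ∈ l.foldl pvStep st.1 ∧ q ∉ st.1 ∧
        q ∈ ["machine learning", "deep learning", "reinforcement learning"]) ∧
      app.Nodup := by
  induction l with
  | nil => exact fun st => ⟨[], by simp, by simp, List.nodup_nil⟩
  | cons x xs ih =>
    intro st
    obtain ⟨a1, e1, m1, d1⟩ := pvInnerB_spec (pvGetI x) st
    have hstep : pvStepPair st x = (pvStep st.1 x, st.2 ++ a1) := e1
    obtain ⟨a2, e2, m2, d2⟩ := ih (pvStep st.1 x, st.2 ++ a1)
    refine ⟨a1 ++ a2, ?_, ?_, ?_⟩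
    · rw [List.foldl_cons, hstep, e2, List.append_assoc, List.foldl_cons]
    · intro q hq
      rcases List.mem_append.1 hq with h | h
      · have hq1 : q ∈ pvStep st.1 x :=
          pvMem_addAll.2 (Or.inr (m1 q h).1)
        refine ⟨?_, (m1 q h).2, pvParents (m1 q h).1⟩
        rw [List.foldl_cons]
        exact pvFoldStep_sub xs (pvStep st.1 x) q hq1
      · refine ⟨by rw [List.foldl_cons]; exact (m2 q h).1, fun hc => (m2 q h).2.1 ?_, (m2 q h).2.2⟩
        exact pvMem_addAll.2 (Or.inl hc)
    · refine List.Nodup.append d1 d2 ?_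
      intro q hq1 hq2
      exact (m2 q hq2).2.1 (pvMem_addAll.2 (Or.inr (m1 q hq1).1))

lemma pvLen3 {app : List String}
    (hsub : ∀ q ∈ app, q ∈ ["machine learning", "deep learning", "reinforcement learning"])
    (hnd : app.Nodup) : app.length ≤ 3 := by
  have h1 : app.length = app.toFinset.card := (List.toFinset_card_of_nodup hnd).symm
  have h2 : app.toFinset ⊆
      (["machine learning", "deep learning", "reinforcement learning"] : List String).toFinset := by
    intro a ha
    simp only [List.mem_toFinset] at *
    exact hsub a ha
  have := Finset.card_le_card h2
  have h3 : (["machine learning", "deep learning", "reinforcement learning"] :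
      List String).toFinset.card = 3 := by decide
  omega

lemma pvLoopB_skip : ∀ (rest : List String) (fuel : Nat)
    (st : PySem.Set String × List String) (i : Nat),
    (st.2.drop i).take rest.length = rest →
    pvLoopB (rest.length + fuel) st i
      = pvLoopB fuel (rest.foldl pvStepPair st) (i + rest.length) := by
  intro rest
  induction rest with
  | nil => intro fuel st i _; simp
  | cons r rs ih =>
    intro fuel st i htake
    simp only [List.length_cons] at htake ⊢
    have hlen : rs.length + 1 ≤ (st.2.drop i).length := by
      have := congrArg List.length htake
      simp only [List.length_take, List.length_cons] at this
      omega
    have hi : i < st.2.length := by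
      rw [List.length_drop] at hlen; omega
    have hdrop : st.2.drop i = st.2[i] :: st.2.drop (i + 1) := List.drop_eq_getElem_cons hi
    have hr : st.2[i] = r := by
      rw [hdrop, List.take_succ_cons, List.cons.injEq] at htake
      exact htake.1
    have htake2 : (st.2.drop (i + 1)).take rs.length = rs := by
      rw [hdrop, List.take_succ_cons, List.cons.injEq] at htake
      exact htake.2
    obtain ⟨a1, e1, -, -⟩ := pvInnerB_spec (pvGetI r) st
    have hstep : pvStepPair st r = (pvStep st.1 r, st.2 ++ a1) := e1
    have htake' : (((pvStepPair st r).2).drop (i + 1)).take rs.length = rs := by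
      rw [hstep, List.drop_append_of_le_length (by omega)]
      have hlen2 : rs.length ≤ (st.2.drop (i + 1)).length := by
        have := congrArg List.length htake2
        simp only [List.length_take] at this
        omega
      rw [List.take_append_of_le_length hlen2]
      exact htake2
    have harith : rs.length + 1 + fuel = (rs.length + fuel) + 1 := by omega
    rw [harith, pvLoopB_eq, dif_pos hi, hr, ih fuel (pvStepPair st r) (i + 1) htake',
      List.foldl_cons]
    congr 1
    omega

lemma pvFB_fold_id : ∀ (ps : List String) (st : PySem.Set String × List String),
    (∀ p ∈ ps, p ∈ st.1) → ps.foldl pvFB st = st := by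
  intro ps
  induction ps with
  | nil => intro st _; rfl
  | cons p ps ih =>
    intro st h
    rw [List.foldl_cons, show pvFB st p = st from by
      rw [pvFB, if_pos ((PySem.Set.contains_iff _ _).2 (h p (by simp)))]]
    exact ih st fun q hq => h q (by simp [hq])

lemma pvLoopB_closed (st : PySem.Set String × List String)
    (hc : ∀ q ∈ st.2, ∀ p ∈ pvGetI q, p ∈ st.1) :
    ∀ (fuel : Nat) (i : Nat), st.2.length ≤ i + fuel → pvLoopB fuel st i = st.1 := by
  intro fuel
  induction fuel generalizing st with
  | zero => intro i _; rfl
  | succ fuel ih =>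
    intro i hle
    rw [pvLoopB_eq]
    by_cases hi : i < st.2.length
    · rw [dif_pos hi]
      have hid : pvStepPair st st.2[i] = st := by
        rw [pvStepPair]
        exact pvFB_fold_id (pvGetI st.2[i]) st (hc st.2[i] (List.getElem_mem hi))
      rw [hid]
      exact ih st hc (i + 1) (by omega)
    · rw [dif_neg hi]

-- skills not in the dict contribute nothing to the fold
lemma pvFilter_noop (l : List String) : ∀ cur : List String,
    (l.filter (fun s => PySem.Dict.contains SKILL_IMPLICATIONS s)).foldl pvStep cur
      = l.foldl pvStep cur := by
  induction l with
  | nil => intro cur; rfl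
  | cons x xs ih =>
    intro cur
    by_cases hk : PySem.Dict.contains SKILL_IMPLICATIONS x = true
    · rw [List.filter_cons_of_pos hk, List.foldl_cons, List.foldl_cons, ih]
    · rw [List.filter_cons_of_neg (by simp [hk]), List.foldl_cons,
        show pvStep cur x = cur from by
          rw [pvStep, pvGetI_nil_of_not_key (by simpa using hk)]; rfl,
        ih]

-- re-processing a skill whose implications are already present is a no-op
lemma pvSkipx (x : String) : ∀ (m cur : List String), (∀ q ∈ pvGetI x, q ∈ cur) →
    (m.filter (fun y => !(y == x))).foldl pvStep cur = m.foldl pvStep cur := by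
  intro m
  induction m with
  | nil => intro cur _; rfl
  | cons y m' ih =>
    intro cur hcur
    by_cases hy : y = x
    · subst hy
      rw [List.filter_cons_of_neg (by simp), List.foldl_cons,
        show pvStep cur y = cur from pvAddAll_id hcur]
      exact ih cur hcur
    · rw [List.filter_cons_of_pos (by simp [hy]), List.foldl_cons, List.foldl_cons]
      exact ih (pvStep cur y) fun q hq => pvMem_addAll.2 (Or.inl (hcur q hq))

-- duplicated skills contribute nothing: folding over a list equals folding over its dedup
lemma pvDedup_noop : ∀ (l cur : List String),
    (PySem.List.dedup l).foldl pvStep cur = l.foldl pvStep cur := by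
  intro l
  induction l with
  | nil => intro cur; rfl
  | cons x xs ih =>
    intro cur
    rw [PySem.List.dedup_eq_ofList, PySem.Set.ofList_cons, List.foldl_cons, List.foldl_cons,
      PySem.Set.discard]
    have hsub : ∀ q ∈ pvGetI x, q ∈ pvStep cur x := fun q hq => pvMem_addAll.2 (Or.inr hq)
    rw [pvSkipx x (PySem.Set.ofList xs) (pvStep cur x) hsub, ← PySem.List.dedup_eq_ofList, ih]

-- dedup commutes with filter
lemma pvDedup_filter (p : String → Bool) : ∀ (l : List String),
    PySem.List.dedup (l.filter p) = (PySem.List.dedup l).filter p := by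
  intro l
  induction l with
  | nil => rfl
  | cons x xs ih =>
    have hxs : PySem.List.dedup (x :: xs)
        = x :: (PySem.List.dedup xs).filter (fun y => !(y == x)) := by
      rw [PySem.List.dedup_eq_ofList, PySem.Set.ofList_cons, PySem.Set.discard,
        ← PySem.List.dedup_eq_ofList]
    by_cases hp : p x = true
    · have hfx : PySem.List.dedup (List.filter p (x :: xs))
          = x :: (PySem.List.dedup (List.filter p xs)).filter (fun y => !(y == x)) := by
        rw [List.filter_cons_of_pos hp, PySem.List.dedup_eq_ofList, PySem.Set.ofList_cons,
          PySem.Set.discard, ← PySem.List.dedup_eq_ofList]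
      rw [hfx, ih, hxs, List.filter_cons_of_pos hp]
      exact congrArg (x :: ·) (List.filter_comm _ _ _)
    · rw [List.filter_cons_of_neg (by simp [hp]), ih, hxs,
        List.filter_cons_of_neg (by simp [hp]), List.filter_filter]
      refine (List.filter_congr ?_).symm
      intro y _
      by_cases hy : p y = true
      · have hne : (y == x) = false := beq_eq_false_iff_ne.2 (fun hyx => hp (hyx ▸ hy))
        simp [hy, hne]
      · simp [hy]

lemma pvB_eq (skills : List String) :
    expand_skill_hierarchy_alt skills
      = (PySem.Set.ofList skills).foldl pvStep (PySem.Set.ofList skills) := by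
  simp only [expand_skill_hierarchy_alt]
  set key : String → Bool := fun s => PySem.Dict.contains SKILL_IMPLICATIONS s with hkey
  set s0 : List String := PySem.Set.ofList skills with hs0
  set Q0 : List String := skills.filter key with hQ0
  -- phase 1: process the initial queue
  have htake : (((s0, Q0) : PySem.Set String × List String).2.drop 0).take Q0.length = Q0 := by
    simp
  rw [pvLoopB_skip Q0 4 (s0, Q0) 0 htake]
  -- the pair fold: first component is the plain fold, queue gains at most the 3 parents
  obtain ⟨app, epair, mapp, dapp⟩ := pvPairFold Q0 (s0, Q0)
  -- the plain fold over Q0 equals the fold over s0 (dedup then drop non-keys)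
  have hfold : Q0.foldl pvStep s0 = s0.foldl pvStep s0 := by
    rw [hQ0, ← pvDedup_noop (skills.filter key) s0, pvDedup_filter key skills,
      show PySem.List.dedup skills = s0 from by rw [hs0, PySem.List.dedup_eq_ofList]]
    exact pvFilter_noop s0 s0
  -- phase 2: the remaining queue entries change nothing
  rw [epair, hfold]
  have hclosed := pvS1_closed s0
  have hQsub : ∀ q ∈ Q0 ++ app, ∀ p ∈ pvGetI q, p ∈ s0.foldl pvStep s0 := by
    intro q hq p hp
    rcases List.mem_append.1 hq with h | h
    · have hq0 : q ∈ s0 := by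
        rw [hs0]
        exact (PySem.Set.mem_ofList _ _).2 (List.mem_of_mem_filter (hQ0 ▸ h))
      exact hclosed q (pvFoldStep_sub s0 s0 q hq0) p hp
    · exact hclosed q (hfold ▸ (mapp q h).1) p hp
  have happ : app.length ≤ 3 := pvLen3 (fun q hq => (mapp q hq).2.2) dapp
  exact pvLoopB_closed _ hQsub 4 (0 + Q0.length) (by simp; omega)

-- ===== VERDICT (by name: the statement is the Claim_ definition above) =====
theorem expand_skill_hierarchy_spec : Claim_equal_expand_skill_hierarchy := by
  intro skills _
  unfold Spec_expand_skill_hierarchy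
  rw [pvA_eq, pvB_eq]
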